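-- pv_equiv track=rewrite | github.com/MichalxPZ/PUT-HackerRank-Python | PastTests/Numbers in number.py | numbersInNumber
-- ===== SOURCE A (Python) =====
-- def numbersInNumber(num):
--     ret = ''
--     for i in range(1, len(num)+1):
--         occurences = {}
--         for j in range(len(num)-i+1):
--             number = 0
--             for e in num[j:j+i]:
--                 number = number * 10 + e
--             if int(number) not in occurences.keys():
--                 occurences[int(number)] = 1
--             else:
--                 occurences[int(number)] += 1
--         most = max(occurences.values())
--         tab = []
--         for occ in occurences.keys():
--             if occurences[occ]==most:
--                 tab.append(occ)
--         ret += (str(sorted(tab)[0]))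
--         ret += "\n"
--     return ret
-- ===== SOURCE B (Python) =====
-- def numbersInNumber(num):
--     n = len(num)
--     out = ""
--     vals = [0] * (n + 1)
--     for i in range(1, n + 1):
--         vals = [vals[j] * 10 + num[j + i - 1] for j in range(n - i + 1)]
--         counts = {}
--         for v in vals:
--             counts[v] = counts.get(v, 0) + 1
--         m = max(counts.values())
--         tab = [v for v in counts if counts[v] == m]
--         out += str(min(tab)) + "\n"
--     return out
-- ===== Notes on version B (the rewrite author's own statement) =====
-- stated objective: faster
-- what changed: Per-length window values are built by dynamic programming from the previous length's values (vals[j] = vals[j]*10 + num[j+i-1]) and counted in one dict pass with min() over the tied keys, removing A's innermost per-window digit loop and its sort of the tied keys.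
import Mathlib
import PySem

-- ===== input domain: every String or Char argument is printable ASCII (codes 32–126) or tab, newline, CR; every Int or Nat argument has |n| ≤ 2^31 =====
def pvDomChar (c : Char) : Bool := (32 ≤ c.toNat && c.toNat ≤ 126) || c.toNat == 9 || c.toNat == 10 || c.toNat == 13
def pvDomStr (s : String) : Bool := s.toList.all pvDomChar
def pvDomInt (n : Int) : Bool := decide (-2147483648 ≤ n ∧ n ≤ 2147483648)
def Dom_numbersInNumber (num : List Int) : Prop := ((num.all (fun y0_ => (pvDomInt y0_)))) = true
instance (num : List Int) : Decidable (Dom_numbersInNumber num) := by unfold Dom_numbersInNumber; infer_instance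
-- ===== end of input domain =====

-- B replaces A's per-window digit loop by a DP update of the previous length's window
-- values and a one-pass counting dict (objective: faster, measured).

-- ===== PORT A =====
-- one iteration of A's outer 'for i in range(1, len(num)+1)' loop
def aStep (num : List Int) (ret : String) (i : Int) : String :=
  let occ : PySem.Dict Int Int :=
    (PySem.List.pyRange 0 (PySem.List.len num - i + 1) 1).foldl (fun d j =>
      let number := (PySem.List.slice num (some j) (some (j + i))).foldl
        (fun a e => a * 10 + e) 0
      if d.contains number = false then d.insert number 1
      else d.insert number (d.getD number 0 + 1)) PySem.Dict.empty
  let most := (PySem.List.max? occ.values (fun v => v)).getD 0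
  let tab := occ.keys.foldl (fun t k => if occ.getD k 0 = most then t ++ [k] else t) []
  -- 'max(...)' / 'sorted(tab)[0]' could only raise on an empty dict, which no iteration
  -- reaches (i ≤ len num gives at least one window): the 0-defaults below are never used
  ret ++ PySem.Int.toStr (PySem.List.pyGetD (PySem.List.sorted tab (fun x => x) false) 0 0) ++ "\n"

def numbersInNumber (num : List Int) : String :=
  (PySem.List.pyRange 1 (PySem.List.len num + 1) 1).foldl (aStep num) ""

-- ===== PORT B =====
-- one iteration of B's outer loop; state = (window values of the previous length, out)
def bStep (num : List Int) (st : List Int × String) (i : Int) : List Int × String :=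
  let vals := (PySem.List.pyRange 0 (PySem.List.len num - i + 1) 1).map (fun j =>
    PySem.List.pyGetD st.1 j 0 * 10 + PySem.List.pyGetD num (j + i - 1) 0)
  let counts := vals.foldl (fun d v => d.insert v (d.getD v 0 + 1))
    (PySem.Dict.empty : PySem.Dict Int Int)
  let m := (PySem.List.max? counts.values (fun v => v)).getD 0
  let tab := counts.keys.filter (fun v => counts.getD v 0 == m)
  -- 'max(...)' / 'min(tab)' could only raise on an empty dict, never reached: 0-defaults unused
  (vals, st.2 ++ PySem.Int.toStr ((PySem.List.min? tab (fun v => v)).getD 0) ++ "\n")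

def numbersInNumber_alt (num : List Int) : String :=
  ((PySem.List.pyRange 1 (PySem.List.len num + 1) 1).foldl (bStep num)
    (List.replicate (num.length + 1) 0, "")).2

-- ===== PRECONDITION & SPEC =====
def Spec_numbersInNumber (num : List Int) (out : String) : Prop := out = numbersInNumber_alt num
instance (num : List Int) (out : String) : Decidable (Spec_numbersInNumber num out) := by unfold Spec_numbersInNumber; infer_instance

-- ===== CLAIM (what is proved, stated in full; the proofs are below) =====
def Claim_equal_numbersInNumber : Prop := ∀ (num : List Int), Dom_numbersInNumber num → Spec_numbersInNumber num (numbersInNumber num)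

-- ===== LEMMAS AND PROOFS =====

-- value of the length-i window of num starting at j
def wv (num : List Int) (i j : Nat) : Int :=
  ((num.drop j).take i).foldl (fun a e => a * 10 + e) 0

-- B's list of window values of length i (indices 0 .. len-i)
def valsAt (num : List Int) (i : Nat) : List Int :=
  (List.range (num.length - i + 1)).map (fun j => wv num i j)

lemma wv_succ (num : List Int) (i j : Nat) (h : j + i < num.length) :
    wv num (i + 1) j = wv num i j * 10 + num.getD (j + i) 0 := by
  unfold wv
  rw [List.take_add_one]
  have h2 : (num.drop j)[i]? = some num[j + i] := by
    rw [List.getElem?_drop, List.getElem?_eq_getElem (by omega)]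
  rw [h2, List.getD_eq_getElem?_getD, List.getElem?_eq_getElem (by omega)]
  simp [List.foldl_append]

-- A's conditional counting insert is the unconditional counter insert
lemma branch_collapse (d : PySem.Dict Int Int) (v : Int) :
    (if d.contains v = false then d.insert v 1 else d.insert v (d.getD v 0 + 1))
      = d.insert v (d.getD v 0 + 1) := by
  cases hc : d.contains v with
  | true => simp
  | false => simp [PySem.Dict.getD_of_not_contains d 0 hc]

-- head of sorted(xs) equals min(xs) (both 0-defaulted on [])
lemma sorted_head_eq_min (xs : List Int) :
    PySem.List.pyGetD (PySem.List.sorted xs (fun x => x) false) 0 0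
      = (PySem.List.min? xs (fun v => v)).getD 0 := by
  rcases hx : PySem.List.min? xs (fun v : Int => v) with _ | v
  · rw [(PySem.List.min?_eq_none_iff xs _).mp hx] at *
    have : PySem.List.sorted ([] : List Int) (fun x => x) false = [] :=
      (PySem.List.sorted_eq_nil_iff [] _ false).mpr rfl
    rw [this]; rfl
  · have hmem := PySem.List.min?_mem hx
    have hmin := PySem.List.min?_isMin hx
    have hperm := PySem.List.sorted_perm xs (fun x : Int => x) false
    have hne : PySem.List.sorted xs (fun x : Int => x) false ≠ [] := by
      intro hnil
      rw [(PySem.List.sorted_eq_nil_iff xs _ false).mp hnil] at hmem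
      exact absurd hmem (List.not_mem_nil)
    set s := PySem.List.sorted xs (fun x : Int => x) false with hs
    have hlen : 0 < s.length := List.length_pos_iff.mpr hne
    have h0 : PySem.List.pyGetD s 0 0 = s[0] := by
      rw [PySem.List.pyGetD_zero, List.getD_eq_getElem?_getD, List.getElem?_eq_getElem hlen]
      rfl
    rw [h0]
    obtain ⟨q, hq, hv⟩ := List.mem_iff_getElem.mp (hperm.mem_iff.mpr hmem)
    have h1 : s[0] ≤ v := hv ▸ PySem.List.sorted_id_getElem_mono xs (Nat.zero_le q) hq
    have h2 : v ≤ s[0] := hmin _ (hperm.mem_iff.mp (List.getElem_mem hlen))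
    simp [le_antisymm h1 h2]

lemma bound_eq (n i : Nat) (h : i < n) :
    ((n : Int) - ((i : Int) + 1) + 1) = ((n - i : Nat) : Int) := by omega

-- B's DP comprehension produces the window values of length i+1
lemma vals_eq (num : List Int) (i : Nat) (h : i < num.length) :
    (PySem.List.pyRange 0 ((PySem.List.len num) - ((i : Int) + 1) + 1) 1).map (fun j =>
      PySem.List.pyGetD (valsAt num i) j 0 * 10 + PySem.List.pyGetD num (j + ((i : Int) + 1) - 1) 0)
      = valsAt num (i + 1) := by
  rw [PySem.List.len_eq, bound_eq _ _ h, PySem.List.pyRange_zero_nat, List.map_map]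
  have hlen : num.length - (i + 1) + 1 = num.length - i := by omega
  conv_rhs => rw [valsAt, hlen]
  apply List.map_congr_left
  intro k hk
  rw [List.mem_range] at hk
  have h1 : ((k : Int) + ((i : Int) + 1) - 1) = ((k + i : Nat) : Int) := by push_cast; ring
  simp only [Function.comp_apply, h1, PySem.List.pyGetD_natCast, valsAt]
  rw [PySem.List.getD_map_range _ _ _ _ (by omega), wv_succ num i k (by omega)]

-- A's counting dict over the slices is B's counting dict over the DP values
lemma occ_eq (num : List Int) (i : Nat) (h : i < num.length) :
    (PySem.List.pyRange 0 ((PySem.List.len num) - ((i : Int) + 1) + 1) 1).foldl (fun d j =>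
      let number := (PySem.List.slice num (some j) (some (j + ((i : Int) + 1)))).foldl
        (fun a e => a * 10 + e) 0
      if d.contains number = false then d.insert number 1
      else d.insert number (d.getD number 0 + 1)) (PySem.Dict.empty : PySem.Dict Int Int)
      = (valsAt num (i + 1)).foldl (fun d v => d.insert v (d.getD v 0 + 1)) PySem.Dict.empty := by
  rw [PySem.List.len_eq, bound_eq _ _ h, PySem.List.pyRange_zero_nat, List.foldl_map]
  have hlen : num.length - (i + 1) + 1 = num.length - i := by omega
  conv_rhs => rw [valsAt, hlen, List.foldl_map]
  apply PySem.List.foldl_congr_mem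
  intro d k hk
  have hs : ((k : Nat) : Int) + ((i : Int) + 1) = ((k : Nat) : Int) + (((i + 1 : Nat)) : Int) := by
    push_cast; ring
  simp only [hs, PySem.List.slice_natCast_add, branch_collapse]
  rfl

-- one outer iteration: B updates the values to length i+1 and appends the same line as A
lemma step_eq (num : List Int) (i : Nat) (h : i < num.length) (ret : String) :
    bStep num (valsAt num i, ret) ((i : Int) + 1)
      = (valsAt num (i + 1), aStep num ret ((i : Int) + 1)) := by
  simp only [bStep, aStep]
  rw [vals_eq num i h, occ_eq num i h, PySem.List.foldl_append_ite_eq_filter, List.nil_append,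
    sorted_head_eq_min]
  rfl

lemma loop_eq (num : List Int) :
    ∀ (k i : Nat), i + k = num.length → ∀ (ret : String),
    (PySem.List.pyRange ((i : Int) + 1) ((num.length : Int) + 1) 1).foldl (aStep num) ret
      = ((PySem.List.pyRange ((i : Int) + 1) ((num.length : Int) + 1) 1).foldl (bStep num)
          (valsAt num i, ret)).2 := by
  intro k
  induction k with
  | zero =>
    intro i hi ret
    rw [PySem.List.pyRange_one_eq_nil (by omega)]
    rfl
  | succ k ih =>
    intro i hi ret
    rw [PySem.List.pyRange_one_cons (by omega : (i : Int) + 1 < (num.length : Int) + 1)]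
    simp only [List.foldl_cons]
    rw [step_eq num i (by omega) ret]
    have hc : ((i : Int) + 1) + 1 = (((i + 1 : Nat)) : Int) + 1 := by push_cast; ring
    rw [hc]
    exact ih (i + 1) (by omega) (aStep num ret ((i : Int) + 1))

-- ===== VERDICT (by name: the statement is the Claim_ definition above) =====
theorem numbersInNumber_spec : Claim_equal_numbersInNumber := by
  intro num _
  show numbersInNumber num = numbersInNumber_alt num
  unfold numbersInNumber numbersInNumber_alt
  have h0 : valsAt num 0 = List.replicate (num.length + 1) 0 := by
    simp [valsAt, wv]
  have h1 := loop_eq num num.length 0 (by omega) ""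
  rw [h0] at h1
  simpa using h1
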